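-- pv_equiv track=rewrite | github.com/Jepson2k/PAROL-Web-Commander | parol_commander/components/editor.py | categorize_command
-- ===== SOURCE A (Python) =====
-- def categorize_command(name: str, doc: str) -> str:
--     """Smart categorization based on method name patterns."""
--     name_lower = name.lower()
--
--     if "smooth_" in name_lower:
--         return "Smooth Motion"
--     elif any(x in name_lower for x in ["move", "jog"]):
--         return "Motion"
--     elif any(x in name_lower for x in ["get_", "ping", "is_", "wait_"]):
--         return "Query"
--     elif "gripper" in name_lower:
--         return "Gripper"
--     elif "gcode" in name_lower:
--         return "GCODE"
--     elif any(
--         x in name_lower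
--         for x in ["enable", "disable", "home", "stop", "clear", "stream", "simulator"]
--     ):
--         return "Control & System"
--     elif any(x in name_lower for x in ["io", "set_"]):
--         return "IO"
--     else:
--         return "Other"
-- ===== SOURCE B (Python) =====
-- _CATS = ["Smooth Motion", "Motion", "Query", "Gripper", "GCODE",
--          "Control & System", "IO", "Other"]
--
-- _RANK = {
--     "smooth_": 0,
--     "move": 1, "jog": 1,
--     "get_": 2, "ping": 2, "is_": 2, "wait_": 2,
--     "gripper": 3,
--     "gcode": 4,
--     "enable": 5, "disable": 5, "home": 5, "stop": 5,
--     "clear": 5, "stream": 5, "simulator": 5,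
--     "io": 6, "set_": 6,
-- }
--
-- def categorize_command(name: str, doc: str) -> str:
--     # One left-to-right scan of the lowered name: at every position check which
--     # patterns start there and keep the minimum category rank seen anywhere.
--     s = name.lower()
--     best = 7
--     for i in range(len(s)):
--         for pat, rank in _RANK.items():
--             if rank < best and s.startswith(pat, i):
--                 best = rank
--     return _CATS[best]
-- ===== Notes on version B (the rewrite author's own statement) =====
-- stated objective: alternative
-- what changed: Replaced the first-match if/elif substring cascade by a single positional scan of the lowered name that, at each index, checks which patterns start there and keeps the minimum category rank, indexing a category table at the end.
import Mathlib
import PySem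

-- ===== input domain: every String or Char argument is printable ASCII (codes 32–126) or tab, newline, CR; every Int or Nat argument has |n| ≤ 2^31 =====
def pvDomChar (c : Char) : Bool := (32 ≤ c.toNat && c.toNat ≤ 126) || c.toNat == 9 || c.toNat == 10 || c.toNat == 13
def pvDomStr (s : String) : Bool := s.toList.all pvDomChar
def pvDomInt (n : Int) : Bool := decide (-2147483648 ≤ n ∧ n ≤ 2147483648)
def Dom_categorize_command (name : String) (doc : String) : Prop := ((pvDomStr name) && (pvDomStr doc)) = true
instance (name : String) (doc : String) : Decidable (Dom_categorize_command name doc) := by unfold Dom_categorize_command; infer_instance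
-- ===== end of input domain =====

-- B replaces A's if/elif substring cascade by a single positional scan of the lowered name that
-- keeps the minimum category rank of any pattern starting at any position (objective: alternative).
-- ===== PORT A =====
def categorize_command (name : String) (doc : String) : String :=
  let name_lower := PySem.Str.lower name
  if PySem.Str.isIn "smooth_" name_lower then "Smooth Motion"
  else if ["move", "jog"].any (fun x => PySem.Str.isIn x name_lower) then "Motion"
  else if ["get_", "ping", "is_", "wait_"].any (fun x => PySem.Str.isIn x name_lower) then "Query"
  else if PySem.Str.isIn "gripper" name_lower then "Gripper"
  else if PySem.Str.isIn "gcode" name_lower then "GCODE"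
  else if ["enable", "disable", "home", "stop", "clear", "stream", "simulator"].any
      (fun x => PySem.Str.isIn x name_lower) then "Control & System"
  else if ["io", "set_"].any (fun x => PySem.Str.isIn x name_lower) then "IO"
  else "Other"

-- ===== PORT B =====
def pvCats : List String :=
  ["Smooth Motion", "Motion", "Query", "Gripper", "GCODE", "Control & System", "IO", "Other"]

def pvRank : List (List Char × Nat) :=
  [(['s', 'm', 'o', 'o', 't', 'h', '_'], 0),
   (['m', 'o', 'v', 'e'], 1),
   (['j', 'o', 'g'], 1),
   (['g', 'e', 't', '_'], 2),
   (['p', 'i', 'n', 'g'], 2),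
   (['i', 's', '_'], 2),
   (['w', 'a', 'i', 't', '_'], 2),
   (['g', 'r', 'i', 'p', 'p', 'e', 'r'], 3),
   (['g', 'c', 'o', 'd', 'e'], 4),
   (['e', 'n', 'a', 'b', 'l', 'e'], 5),
   (['d', 'i', 's', 'a', 'b', 'l', 'e'], 5),
   (['h', 'o', 'm', 'e'], 5),
   (['s', 't', 'o', 'p'], 5),
   (['c', 'l', 'e', 'a', 'r'], 5),
   (['s', 't', 'r', 'e', 'a', 'm'], 5),
   (['s', 'i', 'm', 'u', 'l', 'a', 't', 'o', 'r'], 5),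
   (['i', 'o'], 6),
   (['s', 'e', 't', '_'], 6)]

-- one (pat, rank) test of Source B's inner loop body
def pvF (s : List Char) (i : Nat) (b : Nat) (pr : List Char × Nat) : Nat :=
  if pr.2 < b ∧ PySem.Chars.startswith (s.drop i) pr.1 = true then pr.2 else b

-- Source B's inner loop over the rank table
def pvInner (s : List Char) (i : Nat) (b : Nat) : Nat := pvRank.foldl (pvF s i) b

-- Source B's outer loop over the positions of s
def pvBest (s : List Char) : Nat :=
  (List.range s.length).foldl (fun b i => pvInner s i b) 7

def categorize_command_alt (name : String) (doc : String) : String :=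
  (PySem.List.pyGet? pvCats ((pvBest (PySem.Str.lower name).toList : Nat) : Int)).getD ""

-- ===== PRECONDITION & SPEC =====
def Spec_categorize_command (name : String) (doc : String) (out : String) : Prop :=
  out = categorize_command_alt name doc
instance (name : String) (doc : String) (out : String) : Decidable (Spec_categorize_command name doc out) := by
  unfold Spec_categorize_command; infer_instance

-- ===== CLAIM =====
def Claim_equal_categorize_command : Prop :=
  ∀ (name : String) (doc : String), Dom_categorize_command name doc →
    Spec_categorize_command name doc (categorize_command name doc)

-- ===== LEMMAS AND PROOFS =====
theorem pvF_le (s : List Char) (i b : Nat) (pr : List Char × Nat) : pvF s i b pr ≤ b := by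
  unfold pvF; split <;> omega

theorem pv_inner_le (s : List Char) (i : Nat) :
    ∀ (l : List (List Char × Nat)) (b : Nat), l.foldl (pvF s i) b ≤ b := by
  intro l
  induction l with
  | nil => intro b; exact le_refl b
  | cons pr t ih =>
      intro b
      exact le_trans (ih (pvF s i b pr)) (pvF_le s i b pr)

theorem pv_inner_mem (s : List Char) (i : Nat) :
    ∀ (l : List (List Char × Nat)) (b : Nat),
      l.foldl (pvF s i) b = b ∨
      ∃ pr ∈ l, PySem.Chars.startswith (s.drop i) pr.1 = true ∧ l.foldl (pvF s i) b = pr.2 := by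
  intro l
  induction l with
  | nil => intro b; exact Or.inl rfl
  | cons pr t ih =>
      intro b
      simp only [List.foldl_cons]
      by_cases h : pr.2 < b ∧ PySem.Chars.startswith (s.drop i) pr.1 = true
      · have hf : pvF s i b pr = pr.2 := by unfold pvF; simp [h]
        rcases ih (pvF s i b pr) with h1 | ⟨pr', hmem, hsw, heq⟩
        · exact Or.inr ⟨pr, List.mem_cons_self .., h.2, by rw [h1, hf]⟩
        · exact Or.inr ⟨pr', List.mem_cons_of_mem _ hmem, hsw, heq⟩
      · have hf : pvF s i b pr = b := by unfold pvF; simp only [if_neg h]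
        rw [hf]
        rcases ih b with h1 | ⟨pr', hmem, hsw, heq⟩
        · exact Or.inl h1
        · exact Or.inr ⟨pr', List.mem_cons_of_mem _ hmem, hsw, heq⟩

theorem pv_inner_attain (s : List Char) (i : Nat) :
    ∀ (l : List (List Char × Nat)) (b : Nat) (pr : List Char × Nat), pr ∈ l →
      PySem.Chars.startswith (s.drop i) pr.1 = true → l.foldl (pvF s i) b ≤ pr.2 := by
  intro l
  induction l with
  | nil => intro b pr h; exact absurd h (List.not_mem_nil)
  | cons q t ih =>
      intro b pr hmem hsw
      simp only [List.foldl_cons]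
      rcases List.mem_cons.mp hmem with rfl | hmem'
      · have : pvF s i b pr ≤ pr.2 := by
          unfold pvF; split <;> rename_i h
          · omega
          · rw [Classical.not_and_iff_not_or_not] at h
            rcases h with h | h
            · omega
            · exact absurd hsw h
        exact le_trans (pv_inner_le s i t (pvF s i b pr)) this
      · exact ih (pvF s i b q) pr hmem' hsw

theorem pvInner_le (s : List Char) (i b : Nat) : pvInner s i b ≤ b := by
  unfold pvInner; exact pv_inner_le s i pvRank b

theorem pvInner_mem (s : List Char) (i b : Nat) :
    pvInner s i b = b ∨
    ∃ pr ∈ pvRank, PySem.Chars.startswith (s.drop i) pr.1 = true ∧ pvInner s i b = pr.2 := by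
  unfold pvInner; exact pv_inner_mem s i pvRank b

theorem pvInner_attain (s : List Char) (i b : Nat) (pr : List Char × Nat) (hpr : pr ∈ pvRank)
    (hsw : PySem.Chars.startswith (s.drop i) pr.1 = true) : pvInner s i b ≤ pr.2 := by
  unfold pvInner; exact pv_inner_attain s i pvRank b pr hpr hsw

theorem pv_outer_le (s : List Char) :
    ∀ (l : List Nat) (b : Nat), l.foldl (fun b i => pvInner s i b) b ≤ b := by
  intro l
  induction l with
  | nil => intro b; exact le_refl b
  | cons i t ih =>
      intro b
      simp only [List.foldl_cons]
      exact le_trans (ih (pvInner s i b)) (pvInner_le s i b)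

theorem pv_outer_mem (s : List Char) :
    ∀ (l : List Nat) (b : Nat),
      l.foldl (fun b i => pvInner s i b) b = b ∨
      ∃ i ∈ l, ∃ pr ∈ pvRank, PySem.Chars.startswith (s.drop i) pr.1 = true ∧
        l.foldl (fun b i => pvInner s i b) b = pr.2 := by
  intro l
  induction l with
  | nil => intro b; exact Or.inl rfl
  | cons i t ih =>
      intro b
      simp only [List.foldl_cons]
      rcases ih (pvInner s i b) with h1 | ⟨i', hi', pr', hmem, hsw, heq⟩
      · rcases pvInner_mem s i b with h2 | ⟨pr, hmem, hsw, heq⟩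
        · exact Or.inl (by rw [h1]; exact h2)
        · exact Or.inr ⟨i, List.mem_cons_self .., pr, hmem, hsw, by rw [h1]; exact heq⟩
      · exact Or.inr ⟨i', List.mem_cons_of_mem _ hi', pr', hmem, hsw, heq⟩

theorem pv_outer_attain (s : List Char) :
    ∀ (l : List Nat) (b : Nat) (i : Nat) (pr : List Char × Nat), i ∈ l → pr ∈ pvRank →
      PySem.Chars.startswith (s.drop i) pr.1 = true →
      l.foldl (fun b i => pvInner s i b) b ≤ pr.2 := by
  intro l
  induction l with
  | nil => intro b i pr h; exact absurd h (List.not_mem_nil)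
  | cons j t ih =>
      intro b i pr hmem hpr hsw
      simp only [List.foldl_cons]
      rcases List.mem_cons.mp hmem with rfl | hmem'
      · exact le_trans (pv_outer_le s t (pvInner s i b)) (pvInner_attain s i b pr hpr hsw)
      · exact ih (pvInner s j b) i pr hmem' hpr hsw

theorem pv_match_iff (s p : List Char) (hp : p ≠ []) :
    (∃ i ∈ List.range s.length, PySem.Chars.startswith (s.drop i) p = true) ↔ p <:+: s := by
  rw [← PySem.Chars.isIn_iff_infix, ← PySem.Chars.exists_prefix_drop_iff_isIn]
  constructor
  · rintro ⟨i, _, h⟩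
    exact ⟨i, (PySem.Chars.startswith_iff _ _).mp h⟩
  · rintro ⟨j, hj⟩
    by_cases hlt : j < s.length
    · exact ⟨j, List.mem_range.mpr hlt, (PySem.Chars.startswith_iff _ _).mpr hj⟩
    · exfalso
      have : s.drop j = [] := List.drop_eq_nil_of_le (by omega)
      rw [this] at hj
      exact hp (List.prefix_nil.mp hj)

theorem pv_best_eq (s : List Char) (k : Nat) (hk : k ≤ 7)
    (hup : k = 7 ∨ ∃ pr ∈ pvRank, pr.2 = k ∧ pr.1 <:+: s)
    (hlo : ∀ pr ∈ pvRank, pr.1 <:+: s → k ≤ pr.2) :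
    pvBest s = k := by
  have hne : ∀ pr ∈ pvRank, pr.1 ≠ ([] : List Char) := by decide
  unfold pvBest
  have hub : (List.range s.length).foldl (fun b i => pvInner s i b) 7 ≤ k := by
    rcases hup with rfl | ⟨pr, hmem, hrk, hinf⟩
    · exact pv_outer_le s _ 7
    · obtain ⟨i, hi, hsw⟩ := (pv_match_iff s pr.1 (hne pr hmem)).mpr hinf
      rw [← hrk]
      exact pv_outer_attain s _ 7 i pr hi hmem hsw
  have hlb : k ≤ (List.range s.length).foldl (fun b i => pvInner s i b) 7 := by
    rcases pv_outer_mem s (List.range s.length) 7 with h | ⟨i, hi, pr, hmem, hsw, heq⟩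
    · omega
    · rw [heq]
      exact hlo pr hmem ((pv_match_iff s pr.1 (hne pr hmem)).mp ⟨i, hi, hsw⟩)
  omega

theorem pv_tl_smooth_u : "smooth_".toList = ['s', 'm', 'o', 'o', 't', 'h', '_'] := rfl
theorem pv_tl_move : "move".toList = ['m', 'o', 'v', 'e'] := rfl
theorem pv_tl_jog : "jog".toList = ['j', 'o', 'g'] := rfl
theorem pv_tl_get_u : "get_".toList = ['g', 'e', 't', '_'] := rfl
theorem pv_tl_ping : "ping".toList = ['p', 'i', 'n', 'g'] := rfl
theorem pv_tl_is_u : "is_".toList = ['i', 's', '_'] := rfl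
theorem pv_tl_wait_u : "wait_".toList = ['w', 'a', 'i', 't', '_'] := rfl
theorem pv_tl_gripper : "gripper".toList = ['g', 'r', 'i', 'p', 'p', 'e', 'r'] := rfl
theorem pv_tl_gcode : "gcode".toList = ['g', 'c', 'o', 'd', 'e'] := rfl
theorem pv_tl_enable : "enable".toList = ['e', 'n', 'a', 'b', 'l', 'e'] := rfl
theorem pv_tl_disable : "disable".toList = ['d', 'i', 's', 'a', 'b', 'l', 'e'] := rfl
theorem pv_tl_home : "home".toList = ['h', 'o', 'm', 'e'] := rfl
theorem pv_tl_stop : "stop".toList = ['s', 't', 'o', 'p'] := rfl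
theorem pv_tl_clear : "clear".toList = ['c', 'l', 'e', 'a', 'r'] := rfl
theorem pv_tl_stream : "stream".toList = ['s', 't', 'r', 'e', 'a', 'm'] := rfl
theorem pv_tl_simulator : "simulator".toList = ['s', 'i', 'm', 'u', 'l', 'a', 't', 'o', 'r'] := rfl
theorem pv_tl_io : "io".toList = ['i', 'o'] := rfl
theorem pv_tl_set_u : "set_".toList = ['s', 'e', 't', '_'] := rfl

-- ===== VERDICT =====
theorem categorize_command_spec : Claim_equal_categorize_command := by
  intro name doc _
  unfold Spec_categorize_command categorize_command categorize_command_alt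
  set s := (PySem.Str.lower name).toList with hs
  simp only [List.any_cons, List.any_nil, Bool.or_false, Bool.or_eq_true,
    PySem.Str.isIn_eq, PySem.Chars.isIn_iff_infix, pv_tl_smooth_u, pv_tl_move, pv_tl_jog, pv_tl_get_u, pv_tl_ping, pv_tl_is_u, pv_tl_wait_u, pv_tl_gripper, pv_tl_gcode, pv_tl_enable, pv_tl_disable, pv_tl_home, pv_tl_stop, pv_tl_clear, pv_tl_stream, pv_tl_simulator, pv_tl_io, pv_tl_set_u, ← hs]
  split_ifs with h0 h1 h2 h3 h4 h5 h6
  · have hb : pvBest s = 0 := by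
      apply pv_best_eq s 0 (by omega)
      · exact Or.inr ⟨(['s', 'm', 'o', 'o', 't', 'h', '_'], 0), by decide, rfl, h0⟩
      · intro pr hpr hinf
        fin_cases hpr <;> simp_all
    rw [hb]
    rfl
  · have hb : pvBest s = 1 := by
      apply pv_best_eq s 1 (by omega)
      · rcases h1 with h0'|h1'
        · exact Or.inr ⟨(['m', 'o', 'v', 'e'], 1), by decide, rfl, h0'⟩
        · exact Or.inr ⟨(['j', 'o', 'g'], 1), by decide, rfl, h1'⟩
      · intro pr hpr hinf
        fin_cases hpr <;> simp_all
    rw [hb]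
    rfl
  · have hb : pvBest s = 2 := by
      apply pv_best_eq s 2 (by omega)
      · rcases h2 with h0'|h1'|h2'|h3'
        · exact Or.inr ⟨(['g', 'e', 't', '_'], 2), by decide, rfl, h0'⟩
        · exact Or.inr ⟨(['p', 'i', 'n', 'g'], 2), by decide, rfl, h1'⟩
        · exact Or.inr ⟨(['i', 's', '_'], 2), by decide, rfl, h2'⟩
        · exact Or.inr ⟨(['w', 'a', 'i', 't', '_'], 2), by decide, rfl, h3'⟩
      · intro pr hpr hinf
        fin_cases hpr <;> simp_all
    rw [hb]
    rfl
  · have hb : pvBest s = 3 := by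
      apply pv_best_eq s 3 (by omega)
      · exact Or.inr ⟨(['g', 'r', 'i', 'p', 'p', 'e', 'r'], 3), by decide, rfl, h3⟩
      · intro pr hpr hinf
        fin_cases hpr <;> simp_all
    rw [hb]
    rfl
  · have hb : pvBest s = 4 := by
      apply pv_best_eq s 4 (by omega)
      · exact Or.inr ⟨(['g', 'c', 'o', 'd', 'e'], 4), by decide, rfl, h4⟩
      · intro pr hpr hinf
        fin_cases hpr <;> simp_all
    rw [hb]
    rfl
  · have hb : pvBest s = 5 := by
      apply pv_best_eq s 5 (by omega)
      · rcases h5 with h0'|h1'|h2'|h3'|h4'|h5'|h6'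
        · exact Or.inr ⟨(['e', 'n', 'a', 'b', 'l', 'e'], 5), by decide, rfl, h0'⟩
        · exact Or.inr ⟨(['d', 'i', 's', 'a', 'b', 'l', 'e'], 5), by decide, rfl, h1'⟩
        · exact Or.inr ⟨(['h', 'o', 'm', 'e'], 5), by decide, rfl, h2'⟩
        · exact Or.inr ⟨(['s', 't', 'o', 'p'], 5), by decide, rfl, h3'⟩
        · exact Or.inr ⟨(['c', 'l', 'e', 'a', 'r'], 5), by decide, rfl, h4'⟩
        · exact Or.inr ⟨(['s', 't', 'r', 'e', 'a', 'm'], 5), by decide, rfl, h5'⟩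
        · exact Or.inr ⟨(['s', 'i', 'm', 'u', 'l', 'a', 't', 'o', 'r'], 5), by decide, rfl, h6'⟩
      · intro pr hpr hinf
        fin_cases hpr <;> simp_all
    rw [hb]
    rfl
  · have hb : pvBest s = 6 := by
      apply pv_best_eq s 6 (by omega)
      · rcases h6 with h0'|h1'
        · exact Or.inr ⟨(['i', 'o'], 6), by decide, rfl, h0'⟩
        · exact Or.inr ⟨(['s', 'e', 't', '_'], 6), by decide, rfl, h1'⟩
      · intro pr hpr hinf
        fin_cases hpr <;> simp_all
    rw [hb]
    rfl
  · have hb : pvBest s = 7 := by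
      apply pv_best_eq s 7 (by omega)
      · exact Or.inl rfl
      · intro pr hpr hinf
        fin_cases hpr <;> simp_all
    rw [hb]
    rfl
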